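-- pv_equiv track=rewrite | github.com/GH-00/CodingTestPractice | 06.Backtracking/CodingTestcComplete/10이되는 조합.py | solution
-- ===== SOURCE A (Python) =====
-- def solution(N) :
--     results = [] # 조합 결과를 담을 리스트
--
--     def backtrack(sum, selected_nums, start) :
--         if sum == 10: # 합이 10이 되면 결과 리스트에 추가
--             results.append(selected_nums)
--             return
--
--         for i in range(start, N + 1) : # 다음에 선택할 수 있는 숫자들을 하나씩 선택하면서
--             if sum + i <= 10: # 선택한 숫자의 합이 10보다 작거나 같으면
--                 backtrack(
--                     sum + i, selected_nums + [i], i + 1) # 백트래킹 함수를 재귀적으로 호출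
--
--
--     backtrack(0, [], 1) #백트래킹 함수 호출
--     return results # 조합 결과 반환
-- ===== SOURCE B (Python) =====
-- def solution(N):
--     results = []
--     stack = [(0, [], 1)]
--     while stack:
--         s, sel, start = stack.pop()
--         if s == 10:
--             results.append(sel)
--             continue
--         # push candidates largest-first so the smallest is popped (expanded) next
--         for i in range(min(N, 10 - s), start - 1, -1):
--             stack.append((s + i, sel + [i], i + 1))
--     return results
-- ===== Notes on version B (the rewrite author's own statement) =====
-- stated objective: faster
-- what changed: Replaces the recursive backtracking (which scans all of range(start, N+1) at every node) with an explicit-stack iteration whose candidate loop only runs up to min(N, 10-sum), pushed largest-first to keep the DFS output order.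
import Mathlib
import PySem

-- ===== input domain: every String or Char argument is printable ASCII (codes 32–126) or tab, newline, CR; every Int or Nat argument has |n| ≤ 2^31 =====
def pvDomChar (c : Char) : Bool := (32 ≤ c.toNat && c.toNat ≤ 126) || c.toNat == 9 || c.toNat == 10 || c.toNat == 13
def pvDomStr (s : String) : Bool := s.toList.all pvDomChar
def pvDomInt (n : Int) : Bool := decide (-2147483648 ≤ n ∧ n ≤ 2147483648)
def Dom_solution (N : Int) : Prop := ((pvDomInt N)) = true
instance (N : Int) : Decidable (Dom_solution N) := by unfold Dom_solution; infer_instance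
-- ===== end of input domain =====

-- B replaces A's recursive backtracking by an explicit stack of frames that only
-- enumerates candidates up to min(N, 10 - sum): faster (A scans all of range(start, N+1) at every node).

-- ===== PORT A =====
-- A's nested `backtrack` mutates the shared `results` list; the port returns the
-- list of results this call appends, in order.
def backtrackA (N : Int) (sum : Int) (sel : List Int) (start : Int) : List (List Int) :=
  if sum == 10 then [sel]
  else
    (PySem.List.pyRange start (N + 1) 1).attach.foldl
      (fun acc i =>
        if sum + i.1 ≤ 10 then
          acc ++ backtrackA N (sum + i.1) (sel ++ [i.1]) (i.1 + 1)
        else acc) []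
termination_by (N + 1 - start).toNat
decreasing_by
  have h := (PySem.List.mem_pyRange_one.mp i.2)
  omega

def solution (N : Int) : List (List Int) :=
  backtrackA N 0 [] 1

-- ===== PORT B =====
-- measure for the stack loop: each frame weighs 2^(N+2-start); expanding a frame
-- pushes frames of strictly larger start, whose weights sum to less than the frame's.
def pvMu (N : Int) (stack : List (Int × List Int × Int)) : Nat :=
  (stack.map (fun fr => 2 ^ (N + 2 - fr.2.2).toNat)).sum

theorem pvMu_foldl_push (N : Int) (s : Int) (sel : List Int)
    (l : List Int) (rest : List (Int × List Int × Int)) :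
    pvMu N (l.foldl (fun stk i => (s + i, sel ++ [i], i + 1) :: stk) rest)
      = (l.map (fun i => 2 ^ (N + 1 - i).toNat)).sum + pvMu N rest := by
  induction l generalizing rest with
  | nil => simp
  | cons x l ih =>
    simp only [List.foldl_cons, List.map_cons, List.sum_cons]
    rw [ih]
    have he : (N + 2 - (x + 1)).toNat = (N + 1 - x).toNat := by congr 1; ring
    simp only [pvMu, List.map_cons, List.sum_cons, he]
    omega

theorem pvSum_pow_lt (N : Int) : ∀ (k : Nat) (a b : Int), (b - a).toNat = k → b ≤ N + 1 →
    ((PySem.List.pyRange a b 1).map (fun i => 2 ^ (N + 1 - i).toNat)).sum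
      < 2 ^ (N + 2 - a).toNat := by
  intro k
  induction k with
  | zero =>
    intro a b hk hb
    rw [PySem.List.pyRange_one_eq_nil (by omega)]
    simp
  | succ k ih =>
    intro a b hk hb
    rw [PySem.List.pyRange_one_cons (by omega)]
    simp only [List.map_cons, List.sum_cons]
    have h2 := ih (a + 1) b (by omega) hb
    have he : (N + 2 - (a + 1)).toNat = (N + 1 - a).toNat := by
      congr 1; ring
    rw [he] at h2
    have he2 : (N + 2 - a).toNat = (N + 1 - a).toNat + 1 := by omega
    rw [he2, pow_succ]
    omega

def loopB (N : Int) : List (Int × List Int × Int) → List (List Int) → List (List Int)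
  | [], results => results
  | (s, sel, start) :: rest, results =>
    if s == 10 then loopB N rest (results ++ [sel])
    else
      loopB N
        ((PySem.List.pyRange (min N (10 - s)) (start - 1) (-1)).foldl
          (fun stk i => (s + i, sel ++ [i], i + 1) :: stk) rest)
        results
termination_by stack _ => pvMu N stack
decreasing_by
  · simp only [pvMu, List.map_cons, List.sum_cons]
    have : 0 < 2 ^ (N + 2 - start).toNat := Nat.two_pow_pos _
    omega
  · rw [pvMu_foldl_push, PySem.List.pyRange_neg_one_eq_reverse, List.map_reverse,
      List.sum_reverse]
    have h1 : (start - 1) + 1 = start := by ring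
    rw [h1]
    have h2 := pvSum_pow_lt N ((min N (10 - s) + 1) - start).toNat start
      (min N (10 - s) + 1) rfl (by omega)
    simp only [pvMu, List.map_cons, List.sum_cons]
    omega

def solution_alt (N : Int) : List (List Int) :=
  loopB N [(0, [], 1)] []

-- ===== PRECONDITION & SPEC =====
def Spec_solution (N : Int) (out : List (List Int)) : Prop := out = solution_alt N
instance (N : Int) (out : List (List Int)) : Decidable (Spec_solution N out) := by unfold Spec_solution; infer_instance

-- ===== CLAIM (what is proved, stated in full; the proofs are below) =====
def Claim_equal_solution : Prop := ∀ (N : Int), Dom_solution N → Spec_solution N (solution N)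

-- ===== LEMMAS AND PROOFS =====

theorem foldl_append_if_flatMap {α : Type} (p : α → Prop) [DecidablePred p]
    (g : α → List (List Int)) (l : List α) (acc : List (List Int)) :
    l.foldl (fun a x => if p x then a ++ g x else a) acc
      = acc ++ (l.filter (fun x => decide (p x))).flatMap g := by
  induction l generalizing acc with
  | nil => simp
  | cons x l ih =>
    by_cases h : p x <;> simp [h, ih, List.append_assoc]

theorem filter_le_pyRange : ∀ (k : Nat) (a b c : Int), (b - a).toNat = k →
    (PySem.List.pyRange a b 1).filter (fun i => decide (i ≤ c))
      = PySem.List.pyRange a (min b (c + 1)) 1 := by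
  intro k
  induction k with
  | zero =>
    intro a b c hk
    rw [PySem.List.pyRange_one_eq_nil (by omega),
      PySem.List.pyRange_one_eq_nil (by omega)]
    simp
  | succ k ih =>
    intro a b c hk
    rw [PySem.List.pyRange_one_cons (by omega)]
    by_cases hc : a ≤ c
    · rw [List.filter_cons_of_pos (by simpa), ih (a + 1) b c (by omega)]
      exact (PySem.List.pyRange_one_cons (by omega)).symm
    · rw [List.filter_cons_of_neg (by simp; omega), ih (a + 1) b c (by omega),
        PySem.List.pyRange_one_eq_nil (by omega),
        PySem.List.pyRange_one_eq_nil (by omega)]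

theorem foldr_cons_map {α β : Type} (f : α → β) (l : List α) (rest : List β) :
    l.foldr (fun i stk => f i :: stk) rest = l.map f ++ rest := by
  induction l with
  | nil => rfl
  | cons x l ih => simp [ih]

-- A's recursive call tree, expanded one level, matches B's candidate range.
theorem backtrackA_expand (N s : Int) (sel : List Int) (start : Int) (hs : ¬ s == 10) :
    backtrackA N s sel start
      = (PySem.List.pyRange start (min N (10 - s) + 1) 1).flatMap
          (fun i => backtrackA N (s + i) (sel ++ [i]) (i + 1)) := by
  rw [backtrackA, if_neg hs]
  rw [List.foldl_attach (l := PySem.List.pyRange start (N + 1) 1)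
    (f := fun acc x => if s + x ≤ 10 then acc ++ backtrackA N (s + x) (sel ++ [x]) (x + 1) else acc)
    (b := ([] : List (List Int)))]
  rw [foldl_append_if_flatMap (fun i => s + i ≤ 10)
    (fun i => backtrackA N (s + i) (sel ++ [i]) (i + 1))]
  rw [List.nil_append]
  have : (PySem.List.pyRange start (N + 1) 1).filter (fun i => decide (s + i ≤ 10))
      = (PySem.List.pyRange start (N + 1) 1).filter (fun i => decide (i ≤ 10 - s)) := by
    apply List.filter_congr; intro x _; simp; omega
  rw [this, filter_le_pyRange ((N + 1 - start)).toNat start (N + 1) (10 - s) rfl]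
  have : min (N + 1) (10 - s + 1) = min N (10 - s) + 1 := by omega
  rw [this]

theorem loopB_eq (N : Int) : ∀ stack res, loopB N stack res
    = res ++ stack.flatMap (fun fr => backtrackA N fr.1 fr.2.1 fr.2.2) := by
  intro stack res
  fun_induction loopB N stack res with
  | case1 res => simp
  | case2 s sel start rest res h ih =>
    rw [ih]
    have : backtrackA N s sel start = [sel] := by rw [backtrackA, if_pos h]
    simp [this, List.append_assoc]
  | case3 s sel start rest res h ih =>
    rw [ih, PySem.List.pyRange_neg_one_eq_reverse, List.foldl_reverse]
    have h1 : (start - 1) + 1 = start := by ring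
    rw [h1, foldr_cons_map (fun i => (s + i, sel ++ [i], i + 1))]
    rw [List.flatMap_append, List.flatMap_map]
    rw [List.flatMap_cons, backtrackA_expand N s sel start h]

-- ===== VERDICT (by name: the statement is the Claim_ definition above) =====
theorem solution_spec : Claim_equal_solution := by
  intro N _
  show solution N = solution_alt N
  rw [solution, solution_alt, loopB_eq]
  simp
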